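-- pv_equiv track=rewrite | github.com/hellasleeper108/bigO | big_o_sandbox.py | exponential_time_safe
-- ===== SOURCE A (Python) =====
-- CONFIG = {
--     "safety_enabled": True,
--     "max_safe_n_2pow": 30, # Safe limit for O(2^n) if safety is on
--     "max_safe_n_fact": 10, # Safe limit for O(n!) if safety is on
-- }
--
-- def exponential_time_safe(n): # Helper to simulate work without stack depth issues
--     if CONFIG["safety_enabled"] and n > CONFIG["max_safe_n_2pow"]:
--         raise ValueError(f"Safety limits prevent running O(2^n) with N={n}. Max safe N is {CONFIG['max_safe_n_2pow']}.")
--     count = 0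
--     target = 2**n
--     # Hard cap to prevent freezing even if safety is somehow bypassed or high
--     if target > 100_000_000: return 0
--     for i in range(target): count += 1
--     return count
-- ===== SOURCE B (Python) =====
-- CONFIG = {
--     "safety_enabled": True,
--     "max_safe_n_2pow": 30,
--     "max_safe_n_fact": 10,
-- }
--
-- def exponential_time_safe(n):
--     if CONFIG["safety_enabled"] and n > CONFIG["max_safe_n_2pow"]:
--         raise ValueError(f"Safety limits prevent running O(2^n) with N={n}. Max safe N is {CONFIG['max_safe_n_2pow']}.")
--     # 2**n exceeds the 100_000_000 hard cap exactly when n > 26 (2**27 = 134217728),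
--     # so decide on the exponent and produce the count by a bit shift instead of counting.
--     if n > 26:
--         return 0
--     return 1 << n
-- ===== Notes on version B (the rewrite author's own statement) =====
-- stated objective: faster
-- what changed: Instead of counting 2**n loop iterations, B decides on the exponent itself (the cap 100_000_000 is exceeded exactly when n > 26) and produces the count as a single bit shift 1 << n, never computing or iterating the big power.
import Mathlib
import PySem

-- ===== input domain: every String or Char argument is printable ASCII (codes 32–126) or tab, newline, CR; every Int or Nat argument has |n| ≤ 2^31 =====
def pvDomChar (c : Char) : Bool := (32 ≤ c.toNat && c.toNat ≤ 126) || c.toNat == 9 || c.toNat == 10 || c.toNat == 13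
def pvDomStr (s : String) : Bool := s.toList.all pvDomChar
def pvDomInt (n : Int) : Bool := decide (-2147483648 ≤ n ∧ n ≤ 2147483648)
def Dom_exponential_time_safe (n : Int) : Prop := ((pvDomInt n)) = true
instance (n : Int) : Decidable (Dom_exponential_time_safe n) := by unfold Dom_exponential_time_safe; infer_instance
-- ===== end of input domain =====

-- B decides on the exponent (cap exceeded iff n > 26) and returns 1 <<< n, replacing A's 2^n-iteration counting loop: O(1) vs O(2^n).


-- ===== PORT A =====
-- On Pre_ (0 ≤ n ≤ 30) n.toNat is exact, so 2 ^ n.toNat = Python's 2**n; the n > 30 branch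
-- (Python raises ValueError) and n < 0 (2**n is a float, range raises TypeError) are outside Pre_.
def exponential_time_safe (n : Int) : Int :=
  if 30 < n then 0  -- raise ValueError: excluded by Pre_
  else
    let target : Int := 2 ^ n.toNat
    if target > 100000000 then 0
    else (PySem.List.pyRange 0 target 1).foldl (fun count _ => count + 1) 0

-- ===== PORT B =====
def exponential_time_safe_alt (n : Int) : Int :=
  if 30 < n then 0  -- raise ValueError: excluded by Pre_
  else if 26 < n then 0
  else Int.ofNat (Nat.shiftLeft 1 n.toNat)

-- ===== PRECONDITION & SPEC =====
-- Pre_ excludes exactly the inputs where A raises: n > 30 (explicit ValueError) and n < 0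
-- (2**n is a float, so range(target) raises TypeError).
def Pre_exponential_time_safe (n : Int) : Prop := 0 ≤ n ∧ n ≤ 30
instance (n : Int) : Decidable (Pre_exponential_time_safe n) := by unfold Pre_exponential_time_safe; infer_instance
def pvWitness_exponential_time_safe : Int := 5

def Spec_exponential_time_safe (n : Int) (out : Int) : Prop := out = exponential_time_safe_alt n
instance (n : Int) (out : Int) : Decidable (Spec_exponential_time_safe n out) := by unfold Spec_exponential_time_safe; infer_instance

-- ===== CLAIM (what is proved, stated in full; the proofs are below) =====
def Claim_equal_exponential_time_safe : Prop := ∀ (n : Int), Dom_exponential_time_safe n → Pre_exponential_time_safe n → Spec_exponential_time_safe n (exponential_time_safe n)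

-- ===== LEMMAS AND PROOFS =====

-- counting fold = start + length
theorem foldl_count_eq (l : List Int) (a : Int) :
    l.foldl (fun count _ => count + 1) a = a + l.length := by
  induction l generalizing a with
  | nil => simp
  | cons x xs ih => simp [List.foldl, ih]; omega

-- the hard cap on target = 2^k is crossed exactly above exponent 26
theorem pow_gt_cap_iff (k : Nat) (hk : k ≤ 30) :
    (2:Int) ^ k > 100000000 ↔ 26 < k := by
  constructor
  · intro h
    by_contra hle
    have : (2:Int) ^ k ≤ 2 ^ 26 := pow_le_pow_right₀ (by norm_num) (by omega)
    norm_num at this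
    omega
  · intro h
    have : (2:Int) ^ 27 ≤ 2 ^ k := pow_le_pow_right₀ (by norm_num) (by omega)
    norm_num at this
    omega

-- ===== VERDICT (by name: the statement is the Claim_ definition above) =====
theorem exponential_time_safe_spec : Claim_equal_exponential_time_safe := by
  intro n _ hpre
  unfold Spec_exponential_time_safe exponential_time_safe exponential_time_safe_alt
  obtain ⟨h0, h30⟩ := hpre
  have hn : ¬ (30 < n) := by omega
  simp only [hn, if_false]
  have hk30 : n.toNat ≤ 30 := by omega
  have hiff := pow_gt_cap_iff n.toNat hk30
  by_cases hc : (2:Int) ^ n.toNat > 100000000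
  · have h26 : 26 < n := by
      have := hiff.mp hc; omega
    simp [hc, h26]
  · have h26 : ¬ (26 < n) := by
      intro h; exact hc (hiff.mpr (by omega))
    simp only [hc, if_false, h26]
    rw [foldl_count_eq, PySem.List.length_pyRange_one]
    have hpow : (0:Int) ≤ 2 ^ n.toNat := by positivity
    have hsh : Nat.shiftLeft 1 n.toNat = 2 ^ n.toNat := by
      show 1 <<< n.toNat = 2 ^ n.toNat
      simp [Nat.shiftLeft_eq]
    rw [hsh]
    simp only [sub_zero, zero_add]
    rw [Int.toNat_of_nonneg hpow]
    simp only [Int.ofNat_eq_natCast]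
    push_cast
    ring
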